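-- pv_equiv track=rewrite | github.com/SpendinFR/AI | AGI_Evolutive/reasoning/__init__.py | _infer_causal_mechanisms
-- ===== SOURCE A (Python) =====
-- from typing import Dict, List, Any, Optional, Tuple, Set
--
-- def _infer_causal_mechanisms(event: str, causes: List[Dict]) -> Dict[str, str]:
--     """Infère les mécanismes causaux possibles"""
--     mechanisms = {}
--
--     for cause in causes:
--         cause_text = cause["cause"]
--         if "force" in cause_text.lower() or "push" in cause_text.lower():
--             mechanisms[cause_text] = "mécanisme physique"
--         elif "think" in cause_text.lower() or "want" in cause_text.lower():
--             mechanisms[cause_text] = "mécanisme intentionnel"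
--         else:
--             mechanisms[cause_text] = "mécanisme inconnu"
--
--     return mechanisms
-- ===== SOURCE B (Python) =====
-- from typing import Dict, List
--
-- def _infer_causal_mechanisms(event: str, causes: List[Dict]) -> Dict[str, str]:
--     """Infère les mécanismes causaux possibles"""
--     # Keyword-major staged passes: start everything at "inconnu", then each rule
--     # pass overwrites matching entries; the physical pass runs LAST so it wins,
--     # matching the original precedence (physical before intentional).
--     mechanisms = {}
--     for cause in causes:
--         mechanisms[cause["cause"]] = "mécanisme inconnu"
--     for label, kws in (("mécanisme intentionnel", ("think", "want")),
--                        ("mécanisme physique", ("force", "push"))):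
--         for text in mechanisms:
--             if any(k in text.lower() for k in kws):
--                 mechanisms[text] = label
--     return mechanisms
-- ===== Notes on version B (the rewrite author's own statement) =====
-- stated objective: alternative
-- what changed: Replaces A's per-cause if/elif classification with keyword-major staged passes: one pass initialises every cause to 'mecanisme inconnu', then one sweep per rule overwrites matching keys, the highest-precedence (physical) sweep running last so overwriting reproduces A's elif precedence.
import Mathlib
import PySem

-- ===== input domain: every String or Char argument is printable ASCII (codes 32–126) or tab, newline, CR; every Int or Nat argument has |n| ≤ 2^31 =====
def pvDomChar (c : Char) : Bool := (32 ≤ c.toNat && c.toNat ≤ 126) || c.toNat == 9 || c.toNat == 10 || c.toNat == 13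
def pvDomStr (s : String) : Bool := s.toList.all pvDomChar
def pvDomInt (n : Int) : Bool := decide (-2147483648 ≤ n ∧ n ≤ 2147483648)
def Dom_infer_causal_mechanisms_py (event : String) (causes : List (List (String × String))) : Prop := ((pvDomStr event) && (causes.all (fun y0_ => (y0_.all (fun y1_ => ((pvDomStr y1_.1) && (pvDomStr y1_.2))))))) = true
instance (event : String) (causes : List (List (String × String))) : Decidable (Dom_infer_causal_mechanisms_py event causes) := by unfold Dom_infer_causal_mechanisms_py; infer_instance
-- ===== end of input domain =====

-- B replaces A's per-cause if/elif classification with keyword-major staged passes: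
-- initialise every cause to "mécanisme inconnu", then sweep the dict once per rule,
-- the physical sweep running last so overwriting reproduces A's elif precedence.
-- Pre_ excludes causes lacking the "cause" key, where Python A (and B) raises KeyError.

-- lookup cause["cause"]: first match in the association list
def pyLookupCause (c : List (String × String)) : Option String :=
  (c.find? (fun p => p.1 == "cause")).map (·.2)

-- ===== PORT A =====
def inferStepA (d : PySem.Dict String String) (cause : List (String × String)) :
    PySem.Dict String String :=
  let ct := (pyLookupCause cause).getD ""
  if PySem.Str.isIn "force" (PySem.Str.lower ct) || PySem.Str.isIn "push" (PySem.Str.lower ct) then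
    d.insert ct "mécanisme physique"
  else if PySem.Str.isIn "think" (PySem.Str.lower ct) || PySem.Str.isIn "want" (PySem.Str.lower ct) then
    d.insert ct "mécanisme intentionnel"
  else
    d.insert ct "mécanisme inconnu"

def infer_causal_mechanisms_py (event : String) (causes : List (List (String × String))) : List (String × String) :=
  (causes.foldl inferStepA PySem.Dict.empty).items

-- ===== PORT B =====
-- one sweep: for text in mechanisms: if any(k in text.lower() for k in kws): mechanisms[text] = label
def inferPassB (d : PySem.Dict String String) (rule : String × List String) :
    PySem.Dict String String :=
  d.keys.foldl
    (fun d' t =>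
      if rule.2.any (fun k => PySem.Str.isIn k (PySem.Str.lower t)) then d'.insert t rule.1
      else d') d

def infer_causal_mechanisms_py_alt (event : String) (causes : List (List (String × String))) : List (String × String) :=
  (([("mécanisme intentionnel", ["think", "want"]),
     ("mécanisme physique", ["force", "push"])]).foldl inferPassB
    (causes.foldl
      (fun d cause => d.insert ((pyLookupCause cause).getD "") "mécanisme inconnu")
      PySem.Dict.empty)).items

-- ===== PRECONDITION & SPEC =====
-- Pre_: every cause carries the "cause" key; otherwise Python A (and B) raises KeyError.
def Pre_infer_causal_mechanisms_py (event : String) (causes : List (List (String × String))) : Prop :=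
  causes.all (fun c => c.any (fun p => p.1 == "cause")) = true
instance (event : String) (causes : List (List (String × String))) : Decidable (Pre_infer_causal_mechanisms_py event causes) := by
  unfold Pre_infer_causal_mechanisms_py; infer_instance

def pvWitness_infer_causal_mechanisms_py : String × (List (List (String × String))) :=
  ("storm", [[("cause", "a force hit")], [("cause", "I want tea")], [("cause", "dunno")]])

def Spec_infer_causal_mechanisms_py (event : String) (causes : List (List (String × String))) (out : List (String × String)) : Prop := out = infer_causal_mechanisms_py_alt event causes
instance (event : String) (causes : List (List (String × String))) (out : List (String × String)) : Decidable (Spec_infer_causal_mechanisms_py event causes out) := by unfold Spec_infer_causal_mechanisms_py; infer_instance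

-- ===== CLAIM (what is proved, stated in full; the proofs are below) =====
def Claim_equal_infer_causal_mechanisms_py : Prop := ∀ (event : String) (causes : List (List (String × String))), Dom_infer_causal_mechanisms_py event causes → Pre_infer_causal_mechanisms_py event causes → Spec_infer_causal_mechanisms_py event causes (infer_causal_mechanisms_py event causes)

-- ===== LEMMAS AND PROOFS =====

-- the cause text of one cause, and the label A's if/elif chain assigns to a text
def inferKey (c : List (String × String)) : String := (pyLookupCause c).getD ""

def inferLabel (t : String) : String :=
  if PySem.Str.isIn "force" (PySem.Str.lower t) || PySem.Str.isIn "push" (PySem.Str.lower t) then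
    "mécanisme physique"
  else if PySem.Str.isIn "think" (PySem.Str.lower t) || PySem.Str.isIn "want" (PySem.Str.lower t) then
    "mécanisme intentionnel"
  else "mécanisme inconnu"

-- canonical forms of A's fold and of B's initialisation fold
def inferDictA (causes : List (List (String × String))) : PySem.Dict String String :=
  causes.foldl (fun d x => d.insert (inferKey x) (inferLabel (inferKey x))) PySem.Dict.empty

def inferDict0 (causes : List (List (String × String))) : PySem.Dict String String :=
  causes.foldl (fun d x => d.insert (inferKey x) "mécanisme inconnu") PySem.Dict.empty

-- a fold of inserts whose value depends only on the key: lookup is key-functional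
theorem getD_foldl_insert_keyfun {β : Type} (key : β → String) (g : String → String)
    (l : List β) (d : PySem.Dict String String) (k : String) (dflt : String) :
    (l.foldl (fun d x => d.insert (key x) (g (key x))) d).getD k dflt
      = if k ∈ l.map key then g k else d.getD k dflt := by
  induction l generalizing d with
  | nil => simp
  | cons x l ih =>
    simp only [List.foldl_cons, ih, List.map_cons, List.mem_cons]
    by_cases hk : k ∈ l.map key
    · simp [hk]
    · by_cases he : k = key x
      · subst he
        simp [hk, PySem.Dict.getD_insert_self]
      · rw [PySem.Dict.getD_insert_of_ne d (g (key x)) dflt he]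
        simp [hk, he]

-- one rule sweep: the value of k becomes the label iff k is a swept, matching key
theorem getD_pass (l : List String) (p : String → Bool) (lab : String)
    (d : PySem.Dict String String) (k : String) (dflt : String) :
    (l.foldl (fun d' t => if p t then d'.insert t lab else d') d).getD k dflt
      = if k ∈ l ∧ p k = true then lab else d.getD k dflt := by
  induction l generalizing d with
  | nil => simp
  | cons x l ih =>
    simp only [List.foldl_cons]
    by_cases hp : p x = true
    · rw [if_pos hp, ih]
      by_cases hkl : k ∈ l ∧ p k = true
      · rw [if_pos hkl, if_pos ⟨List.mem_cons_of_mem _ hkl.1, hkl.2⟩]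
      · rw [if_neg hkl]
        by_cases he : k = x
        · subst he
          rw [PySem.Dict.getD_insert_self d k lab dflt,
              if_pos ⟨List.mem_cons_self, hp⟩]
        · rw [PySem.Dict.getD_insert_of_ne d lab dflt he, if_neg]
          rintro ⟨hm, hpk⟩
          rcases List.mem_cons.1 hm with h | h
          · exact he h
          · exact hkl ⟨h, hpk⟩
    · rw [if_neg hp, ih]
      have hiff : (k ∈ x :: l ∧ p k = true) ↔ (k ∈ l ∧ p k = true) := by
        constructor
        · rintro ⟨hm, hpk⟩
          rcases List.mem_cons.1 hm with h | h
          · exact absurd (h ▸ hpk) hp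
          · exact ⟨h, hpk⟩
        · rintro ⟨hm, hpk⟩
          exact ⟨List.mem_cons_of_mem _ hm, hpk⟩
      simp only [hiff]

-- a rule sweep over keys already in the dict leaves the key list unchanged
theorem keys_pass (l : List String) (p : String → Bool) (lab : String)
    (d : PySem.Dict String String) (h : ∀ t ∈ l, t ∈ d.keys) :
    (l.foldl (fun d' t => if p t then d'.insert t lab else d') d).keys = d.keys := by
  induction l generalizing d with
  | nil => rfl
  | cons x l ih =>
    simp only [List.foldl_cons]
    by_cases hp : p x = true
    · have hx : d.contains x = true := by
        rw [PySem.Dict.contains_iff_mem_keys]; exact h x (by simp)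
      have hkeys : (d.insert x lab).keys = d.keys := PySem.Dict.keys_insert_of_contains d lab hx
      rw [if_pos hp, ih (d.insert x lab) (fun t ht => by rw [hkeys]; exact h t (by simp [ht]))]
      exact hkeys
    · rw [if_neg hp]
      exact ih d (fun t ht => h t (by simp [ht]))

-- ===== VERDICT (by name: the statement is the Claim_ definition above) =====
theorem infer_causal_mechanisms_py_spec : Claim_equal_infer_causal_mechanisms_py := by
  intro event causes _ _
  unfold Spec_infer_causal_mechanisms_py infer_causal_mechanisms_py infer_causal_mechanisms_py_alt
  -- A's fold inserts the chain's label for each key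
  have hA : causes.foldl inferStepA PySem.Dict.empty = inferDictA causes := by
    apply List.foldl_ext
    intro d c _
    simp only [inferStepA, inferDictA, inferKey, inferLabel]
    split_ifs <;> rfl
  rw [hA]
  -- B's two sweeps, written out
  have hB : (([("mécanisme intentionnel", ["think", "want"]),
      ("mécanisme physique", ["force", "push"])] : List (String × List String)).foldl inferPassB
      (causes.foldl
        (fun d cause => d.insert ((pyLookupCause cause).getD "") "mécanisme inconnu")
        PySem.Dict.empty))
      = inferPassB (inferPassB (inferDict0 causes) ("mécanisme intentionnel", ["think", "want"]))
          ("mécanisme physique", ["force", "push"]) := rfl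
  rw [hB]
  -- key lists
  have hkA : (inferDictA causes).keys = PySem.Set.ofList (causes.map inferKey) := by
    have h := PySem.Dict.keys_foldl_insert_key (ν := String) causes inferKey
      (fun _ x => inferLabel (inferKey x)) PySem.Dict.empty
    rw [PySem.Dict.keys_empty, PySem.Set.update_nil_left] at h
    exact h
  have hk0 : (inferDict0 causes).keys = PySem.Set.ofList (causes.map inferKey) := by
    have h := PySem.Dict.keys_foldl_insert_key (ν := String) causes inferKey
      (fun _ _ => "mécanisme inconnu") PySem.Dict.empty
    rw [PySem.Dict.keys_empty, PySem.Set.update_nil_left] at h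
    exact h
  have hndA : (inferDictA causes).keys.Nodup :=
    PySem.Dict.nodup_keys_foldl_insert_key causes inferKey _ PySem.Dict.empty
      (by rw [PySem.Dict.keys_empty]; exact List.nodup_nil)
  have hnd0 : (inferDict0 causes).keys.Nodup :=
    PySem.Dict.nodup_keys_foldl_insert_key causes inferKey _ PySem.Dict.empty
      (by rw [PySem.Dict.keys_empty]; exact List.nodup_nil)
  -- the two sweeps keep the key list
  have hk1 : (inferPassB (inferDict0 causes) ("mécanisme intentionnel", ["think", "want"])).keys
      = (inferDict0 causes).keys :=
    keys_pass (inferDict0 causes).keys _ _ (inferDict0 causes) (fun t ht => ht)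
  have hk2 : (inferPassB (inferPassB (inferDict0 causes) ("mécanisme intentionnel", ["think", "want"]))
        ("mécanisme physique", ["force", "push"])).keys
      = (inferDict0 causes).keys := by
    rw [show (inferPassB (inferPassB (inferDict0 causes) ("mécanisme intentionnel", ["think", "want"]))
        ("mécanisme physique", ["force", "push"])).keys
      = (inferPassB (inferDict0 causes) ("mécanisme intentionnel", ["think", "want"])).keys
      from keys_pass _ _ _ _ (fun t ht => ht)]
    exact hk1
  -- compare items key by key
  rw [PySem.Dict.items_eq_map_keys (inferDictA causes) hndA "",
      PySem.Dict.items_eq_map_keys _ (by rw [hk2]; exact hnd0) "",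
      hk2, hkA, hk0]
  apply List.map_congr_left
  intro k hkmem'
  have hkmem : k ∈ causes.map inferKey := (PySem.Set.mem_ofList _ _).1 hkmem'
  have hkd0 : k ∈ (inferDict0 causes).keys := by
    rw [hk0]; exact (PySem.Set.mem_ofList _ _).2 hkmem
  have hkd1 : k ∈ (inferPassB (inferDict0 causes) ("mécanisme intentionnel", ["think", "want"])).keys := by
    rw [hk1]; exact hkd0
  -- values on both sides
  have hvA : (inferDictA causes).getD k "" = inferLabel k := by
    have h := getD_foldl_insert_keyfun inferKey inferLabel causes PySem.Dict.empty k ""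
    rw [if_pos hkmem] at h
    exact h
  have hv0 : (inferDict0 causes).getD k "" = "mécanisme inconnu" := by
    have h := getD_foldl_insert_keyfun inferKey (fun _ => "mécanisme inconnu") causes
      PySem.Dict.empty k ""
    rw [if_pos hkmem] at h
    exact h
  have hv1 : (inferPassB (inferDict0 causes) ("mécanisme intentionnel", ["think", "want"])).getD k ""
      = if (["think", "want"] : List String).any (fun w => PySem.Str.isIn w (PySem.Str.lower k)) then
          "mécanisme intentionnel" else "mécanisme inconnu" := by
    have h := getD_pass (inferDict0 causes).keys
      (fun t => (["think", "want"] : List String).any (fun w => PySem.Str.isIn w (PySem.Str.lower t)))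
      "mécanisme intentionnel" (inferDict0 causes) k ""
    rw [hv0] at h
    rw [show (inferPassB (inferDict0 causes) ("mécanisme intentionnel", ["think", "want"])).getD k ""
        = _ from h]
    by_cases hc : (["think", "want"] : List String).any (fun w => PySem.Str.isIn w (PySem.Str.lower k)) = true
    · rw [if_pos ⟨hkd0, hc⟩, if_pos hc]
    · rw [if_neg (fun hx => hc hx.2), if_neg hc]
  have hvB : (inferPassB (inferPassB (inferDict0 causes) ("mécanisme intentionnel", ["think", "want"]))
        ("mécanisme physique", ["force", "push"])).getD k "" = inferLabel k := by
    have h := getD_pass (inferPassB (inferDict0 causes) ("mécanisme intentionnel", ["think", "want"])).keys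
      (fun t => (["force", "push"] : List String).any (fun w => PySem.Str.isIn w (PySem.Str.lower t)))
      "mécanisme physique"
      (inferPassB (inferDict0 causes) ("mécanisme intentionnel", ["think", "want"])) k ""
    rw [hv1] at h
    rw [show (inferPassB (inferPassB (inferDict0 causes) ("mécanisme intentionnel", ["think", "want"]))
        ("mécanisme physique", ["force", "push"])).getD k "" = _ from h]
    have hq2 : (["force", "push"] : List String).any (fun w => PySem.Str.isIn w (PySem.Str.lower k))
        = (PySem.Str.isIn "force" (PySem.Str.lower k) || PySem.Str.isIn "push" (PySem.Str.lower k)) := by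
      simp [List.any]
    have hq1 : (["think", "want"] : List String).any (fun w => PySem.Str.isIn w (PySem.Str.lower k))
        = (PySem.Str.isIn "think" (PySem.Str.lower k) || PySem.Str.isIn "want" (PySem.Str.lower k)) := by
      simp [List.any]
    rw [hq1, hq2]
    unfold inferLabel
    by_cases h2 : (PySem.Str.isIn "force" (PySem.Str.lower k) || PySem.Str.isIn "push" (PySem.Str.lower k)) = true
    · rw [if_pos ⟨hkd1, h2⟩, if_pos h2]
    · rw [if_neg (fun hx => h2 hx.2), if_neg h2]
  rw [hvA, hvB]
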